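-- pv_equiv track=rewrite | github.com/Nolan-Olhausen/TLOPOPotionsMaster | MyScripts/brew_core/recovery_automation.py | plan_potion_list_scroll
-- ===== SOURCE A (Python) =====
-- from collections import deque
--
-- VISIBLE_LIST_ROWS = 23
--
-- def scroll_down_new_top(top: int, max_top: int) -> int:
--     """One in-game ``potion_list_down`` click: +2 while possible, else +1 to ``max_top``."""
--     if top >= max_top:
--         return top
--     if top + 2 <= max_top:
--         return top + 2
--     return top + 1
--
-- def min_scroll_clicks_to_top(goal_top: int, max_top: int) -> int | None:
--     """Minimum ``potion_list_down`` clicks to reach ``goal_top`` from list top (0)."""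
--     if goal_top < 0 or goal_top > max_top:
--         return None
--     if goal_top == 0:
--         return 0
--     q: deque[tuple[int, int]] = deque([(0, 0)])
--     seen = {0}
--     while q:
--         top, d = q.popleft()
--         nt = scroll_down_new_top(top, max_top)
--         if nt == goal_top:
--             return d + 1
--         if nt not in seen and nt > top:
--             seen.add(nt)
--             q.append((nt, d + 1))
--     return None
--
-- def plan_potion_list_scroll(
--     target_index: int, num_potions: int
-- ) -> tuple[int, int, int]:
--     """
--     Minimum scrolls and row to click for a0-based catalog index.
--
--     Returns ``(down_clicks, row_1based, final_top_index)``.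
--     """
--     if num_potions <= 0:
--         return 0, 1, 0
--     ti = max(0, min(target_index, num_potions - 1))
--     max_top = max(0, num_potions - VISIBLE_LIST_ROWS)
--     low = max(0, ti - (VISIBLE_LIST_ROWS - 1))
--     high = min(ti, max_top)
--     best: tuple[int, int] | None = None
--     for T in range(low, high + 1):
--         clicks = min_scroll_clicks_to_top(T, max_top)
--         if clicks is None:
--             continue
--         if best is None or clicks < best[0] or (clicks == best[0] and T < best[1]):
--             best = (clicks, T)
--     if best is None:
--         T = min(max(ti, 0), max_top)
--         c = min_scroll_clicks_to_top(T, max_top) or 0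
--         best = (c, T)
--     clicks, final_top = best
--     row = ti - final_top + 1
--     row = max(1, min(VISIBLE_LIST_ROWS, row))
--     return clicks, row, final_top
-- ===== SOURCE B (Python) =====
-- VISIBLE_LIST_ROWS = 23
--
-- def plan_potion_list_scroll(target_index, num_potions):
--     # Closed form: the scroll path from top 0 is deterministic (0,2,4,... then
--     # possibly +1 to max_top), so reachable tops are the even ones plus max_top,
--     # and reaching top T costs (T+1)//2 clicks.  The best window top is simply
--     # the smallest reachable T in [low, high] (cost is monotone in T).
--     if num_potions <= 0:
--         return 0, 1, 0
--     ti = max(0, min(target_index, num_potions - 1))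
--     max_top = max(0, num_potions - VISIBLE_LIST_ROWS)
--     low = max(0, ti - (VISIBLE_LIST_ROWS - 1))
--     high = min(ti, max_top)
--     if low > high:
--         T = max_top
--     elif low % 2 == 0 or low == high:
--         T = low
--     else:
--         T = low + 1
--     clicks = (T + 1) // 2
--     row = max(1, min(VISIBLE_LIST_ROWS, ti - T + 1))
--     return clicks, row, T
-- ===== Notes on version B (the rewrite author's own statement) =====
-- stated objective: faster
-- what changed: Replaces the per-candidate BFS over scroll states (O(max_top) each, 23 candidates) with a closed form: reachable tops are the even ones plus max_top, with cost (T+1)//2, so the best window top is the smallest reachable T in [low,high], computed by parity arithmetic.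
import Mathlib
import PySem

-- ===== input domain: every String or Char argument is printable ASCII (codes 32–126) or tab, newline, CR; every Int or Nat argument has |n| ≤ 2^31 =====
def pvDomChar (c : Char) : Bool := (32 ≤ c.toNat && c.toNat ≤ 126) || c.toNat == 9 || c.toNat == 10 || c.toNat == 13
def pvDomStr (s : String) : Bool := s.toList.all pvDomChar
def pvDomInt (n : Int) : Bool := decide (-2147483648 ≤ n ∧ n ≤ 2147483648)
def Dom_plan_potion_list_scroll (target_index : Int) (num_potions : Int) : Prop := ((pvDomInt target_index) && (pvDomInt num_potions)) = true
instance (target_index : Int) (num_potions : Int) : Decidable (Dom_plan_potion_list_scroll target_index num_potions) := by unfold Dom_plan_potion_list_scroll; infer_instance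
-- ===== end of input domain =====

-- B replaces A's per-candidate BFS over scroll tops (O(num_potions)) with O(1)
-- parity arithmetic: reachable tops are the even ones plus max_top, cost (T+1)//2.

-- ===== PORT A =====
def VISIBLE_LIST_ROWS : Int := 23

def scroll_down_new_top (top : Int) (max_top : Int) : Int :=
  if top ≥ max_top then top
  else if top + 2 ≤ max_top then top + 2
  else top + 1

-- the BFS 'while q' loop; fuel only makes the recursion total (never exhausted
-- on the calls min_scroll_clicks_to_top makes — see mscLoop_spec below)
def mscLoop (goal max_top : Int) : Nat → List (Int × Int) → PySem.Set Int → Option Int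
  | _, [], _ => none
  | 0, _ :: _, _ => none
  | fuel + 1, (top, d) :: q, seen =>
      let nt := scroll_down_new_top top max_top
      if nt = goal then some (d + 1)
      else if ¬ nt ∈ seen ∧ nt > top then
        mscLoop goal max_top fuel (q ++ [(nt, d + 1)]) (PySem.Set.add seen nt)
      else
        mscLoop goal max_top fuel q seen

def min_scroll_clicks_to_top (goal_top : Int) (max_top : Int) : Option Int :=
  if goal_top < 0 ∨ goal_top > max_top then none
  else if goal_top = 0 then some 0
  else mscLoop goal_top max_top (max_top.toNat + 2) [(0, 0)] (PySem.Set.ofList [0])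

-- the 'for T in range(low, high+1)' loop accumulating best
def planStep (max_top : Int) (best : Option (Int × Int)) (T : Int) : Option (Int × Int) :=
  match min_scroll_clicks_to_top T max_top with
  | none => best
  | some clicks =>
    match best with
    | none => some (clicks, T)
    | some (bc, bT) =>
        if clicks < bc ∨ (clicks = bc ∧ T < bT) then some (clicks, T) else best

def plan_potion_list_scroll (target_index : Int) (num_potions : Int) : Int × Int × Int :=
  if num_potions ≤ 0 then (0, 1, 0)
  else
    let ti := max 0 (min target_index (num_potions - 1))
    let max_top := max 0 (num_potions - VISIBLE_LIST_ROWS)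
    let low := max 0 (ti - (VISIBLE_LIST_ROWS - 1))
    let high := min ti max_top
    let best0 := (PySem.List.pyRange low (high + 1) 1).foldl (planStep max_top) none
    let best :=
      -- 'if best is None: T = ...; c = min_scroll_clicks_to_top(T, max_top) or 0'
      -- ('or 0' on an int option = getD 0: None and the falsy 0 both become 0)
      best0.getD ((min_scroll_clicks_to_top (min (max ti 0) max_top) max_top).getD 0,
                  min (max ti 0) max_top)
    let clicks := best.1
    let final_top := best.2
    let row := ti - final_top + 1
    let row2 := max 1 (min VISIBLE_LIST_ROWS row)
    (clicks, row2, final_top)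

-- ===== PORT B =====
def plan_potion_list_scroll_alt (target_index : Int) (num_potions : Int) : Int × Int × Int :=
  if num_potions ≤ 0 then (0, 1, 0)
  else
    let ti := max 0 (min target_index (num_potions - 1))
    let max_top := max 0 (num_potions - 23)
    let low := max 0 (ti - 22)
    let high := min ti max_top
    let T :=
      if low > high then max_top
      else if PySem.Int.mod low 2 = 0 ∨ low = high then low
      else low + 1
    let clicks := PySem.Int.floordiv (T + 1) 2
    let row := max 1 (min 23 (ti - T + 1))
    (clicks, row, T)

-- ===== PRECONDITION & SPEC =====
def Spec_plan_potion_list_scroll (target_index : Int) (num_potions : Int) (out : Int × Int × Int) : Prop := out = plan_potion_list_scroll_alt target_index num_potions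
instance (target_index : Int) (num_potions : Int) (out : Int × Int × Int) : Decidable (Spec_plan_potion_list_scroll target_index num_potions out) := by unfold Spec_plan_potion_list_scroll; infer_instance

-- ===== CLAIM (what is proved, stated in full; the proofs are below) =====
def Claim_equal_plan_potion_list_scroll : Prop := ∀ (target_index : Int) (num_potions : Int), Dom_plan_potion_list_scroll target_index num_potions → Spec_plan_potion_list_scroll target_index num_potions (plan_potion_list_scroll target_index num_potions)

-- ===== LEMMAS AND PROOFS =====

-- The BFS queue is in fact always a singleton; from state (t, d) the loop
-- returns some (d + (goal - t + 1)/2) iff goal is reachable strictly above t.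
theorem mscLoop_spec (goal max_top : Int) : ∀ (fuel : Nat) (t d : Int) (seen : PySem.Set Int),
    0 ≤ t → t ≤ max_top → 0 < goal → goal ≤ max_top → goal ≠ t →
    (∀ x ∈ seen, x ≤ t) → (max_top - t).toNat + 1 ≤ fuel →
    mscLoop goal max_top fuel [(t, d)] seen =
      (if t < goal ∧ (goal % 2 = t % 2 ∨ goal = max_top)
       then some (d + (goal - t + 1) / 2) else none) := by
  intro fuel
  induction fuel with
  | zero => intro t d seen _ ht2 _ _ _ _ hf; omega
  | succ fuel ih =>
    intro t d seen ht0 htm hg0 hgm hgt hseen hf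
    by_cases hge : t ≥ max_top
    · -- t = max_top: nt = t ≠ goal, nothing pushed, queue empties
      have ht : t = max_top := le_antisymm htm hge
      have hnt : scroll_down_new_top t max_top = t := by
        unfold scroll_down_new_top; rw [if_pos hge]
      simp only [mscLoop, hnt]
      rw [if_neg (by omega)]
      rw [if_neg (by simp)]
      rw [if_neg (by omega)]
    · by_cases h2 : t + 2 ≤ max_top
      · -- nt = t + 2
        have hnt : scroll_down_new_top t max_top = t + 2 := by
          unfold scroll_down_new_top; rw [if_neg hge, if_pos h2]
        simp only [mscLoop, hnt]
        by_cases hg : t + 2 = goal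
        · rw [if_pos hg]
          rw [if_pos ⟨by omega, Or.inl (by omega)⟩]
          simp only [Option.some.injEq]
          omega
        · rw [if_neg hg]
          have hnm : ¬ (t + 2) ∈ seen := fun h => by have := hseen _ h; omega
          rw [if_pos ⟨hnm, by omega⟩]
          rw [List.nil_append]
          rw [ih (t + 2) (d + 1) (PySem.Set.add seen (t + 2)) (by omega) h2 hg0 hgm
              (by omega)
              (by intro x hx; rw [PySem.Set.mem_add] at hx
                  rcases hx with hx | hx
                  · have := hseen _ hx; omega
                  · omega)
              (by omega)]
          by_cases hc : t + 2 < goal ∧ (goal % 2 = (t + 2) % 2 ∨ goal = max_top)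
          · rw [if_pos hc, if_pos (by omega)]
            simp only [Option.some.injEq]
            omega
          · rw [if_neg hc, if_neg (by omega)]
      · -- nt = t + 1 = max_top
        have hmt : max_top = t + 1 := by omega
        have hnt : scroll_down_new_top t max_top = t + 1 := by
          unfold scroll_down_new_top; rw [if_neg hge, if_neg h2]
        simp only [mscLoop, hnt]
        by_cases hg : t + 1 = goal
        · rw [if_pos hg]
          rw [if_pos ⟨by omega, Or.inr (by omega)⟩]
          simp only [Option.some.injEq]
          omega
        · rw [if_neg hg]
          have hnm : ¬ (t + 1) ∈ seen := fun h => by have := hseen _ h; omega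
          rw [if_pos ⟨hnm, by omega⟩]
          rw [List.nil_append]
          rw [ih (t + 1) (d + 1) (PySem.Set.add seen (t + 1)) (by omega) (by omega) hg0 hgm
              (by omega)
              (by intro x hx; rw [PySem.Set.mem_add] at hx
                  rcases hx with hx | hx
                  · have := hseen _ hx; omega
                  · omega)
              (by omega)]
          rw [if_neg (by omega), if_neg (by omega)]

-- closed form for min_scroll_clicks_to_top
theorem msc_eq (goal max_top : Int) (hm : 0 ≤ max_top) :
    min_scroll_clicks_to_top goal max_top =
      (if 0 ≤ goal ∧ goal ≤ max_top ∧ (goal % 2 = 0 ∨ goal = max_top)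
       then some ((goal + 1) / 2) else none) := by
  unfold min_scroll_clicks_to_top
  by_cases h1 : goal < 0 ∨ goal > max_top
  · rw [if_pos h1, if_neg (by omega)]
  · rw [if_neg h1]
    by_cases h0 : goal = 0
    · rw [if_pos h0, if_pos (by omega)]
      subst h0; norm_num
    · rw [if_neg h0]
      rw [mscLoop_spec goal max_top (max_top.toNat + 2) 0 0 (PySem.Set.ofList [0])
          le_rfl hm (by omega) (by omega) (by omega)
          (by intro x hx; rw [PySem.Set.mem_ofList] at hx; simp at hx; omega)
          (by omega)]
      simp only [Int.zero_emod, sub_zero, zero_add]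
      by_cases hc : 0 < goal ∧ (goal % 2 = 0 ∨ goal = max_top)
      · rw [if_pos hc, if_pos (by omega)]
      · rw [if_neg hc, if_neg (by omega)]

-- once best = ((bT+1)/2, bT) holds, later (larger) candidates never replace it
theorem planFold_keep (max_top : Int) (hm : 0 ≤ max_top) :
    ∀ (l : List Int) (bT : Int), (∀ T ∈ l, bT < T) →
    l.foldl (planStep max_top) (some ((bT + 1) / 2, bT)) = some ((bT + 1) / 2, bT) := by
  intro l
  induction l with
  | nil => intro bT _; rfl
  | cons T l ih =>
    intro bT hlt
    have hT : bT < T := hlt T List.mem_cons_self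
    simp only [List.foldl_cons]
    have hstep : planStep max_top (some ((bT + 1) / 2, bT)) T = some ((bT + 1) / 2, bT) := by
      unfold planStep
      rw [msc_eq T max_top hm]
      by_cases hr : 0 ≤ T ∧ T ≤ max_top ∧ (T % 2 = 0 ∨ T = max_top)
      · rw [if_pos hr]
        simp only
        rw [if_neg (by omega)]
      · rw [if_neg hr]
    rw [hstep, ih bT (fun x hx => hlt x (List.mem_cons_of_mem _ hx))]

-- the whole candidate fold finds the smallest reachable top in [low, high]
theorem planFold_eq (low high max_top : Int) (h0 : 0 ≤ low) (hlh : low ≤ high)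
    (hhm : high ≤ max_top) :
    (PySem.List.pyRange low (high + 1) 1).foldl (planStep max_top) none =
      (if low % 2 = 0 then some ((low + 1) / 2, low)
       else if low < high then some ((low + 1 + 1) / 2, low + 1)
       else if low = max_top then some ((low + 1) / 2, low)
       else none) := by
  have hm : 0 ≤ max_top := by omega
  have hmem : ∀ (a b x : Int), x ∈ PySem.List.pyRange a b 1 → a ≤ x := by
    intro a b x hx
    exact (PySem.List.mem_pyRange_one.mp hx).1
  rw [PySem.List.pyRange_one_cons (by omega)]
  simp only [List.foldl_cons]
  by_cases he : low % 2 = 0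
  · rw [if_pos he]
    have hstep : planStep max_top none low = some ((low + 1) / 2, low) := by
      unfold planStep
      rw [msc_eq low max_top hm, if_pos ⟨h0, by omega, Or.inl he⟩]
    rw [hstep]
    exact planFold_keep max_top hm (PySem.List.pyRange (low + 1) (high + 1) 1) low
      (by intro x hx; have := hmem _ _ _ hx; omega)
  · rw [if_neg he]
    by_cases hlt : low < high
    · rw [if_pos hlt]
      -- low odd and low < high ≤ max_top, so low ≠ max_top: unreachable, skipped
      have hstep : planStep max_top none low = none := by
        unfold planStep
        rw [msc_eq low max_top hm, if_neg (by omega)]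
      rw [hstep, PySem.List.pyRange_one_cons (by omega)]
      simp only [List.foldl_cons]
      have hstep2 : planStep max_top none (low + 1) = some ((low + 1 + 1) / 2, low + 1) := by
        unfold planStep
        rw [msc_eq (low + 1) max_top hm, if_pos ⟨by omega, by omega, Or.inl (by omega)⟩]
      rw [hstep2]
      exact planFold_keep max_top hm (PySem.List.pyRange (low + 1 + 1) (high + 1) 1) (low + 1)
        (by intro x hx; have := hmem _ _ _ hx; omega)
    · -- low = high, low odd: singleton range
      rw [if_neg hlt]
      have hle : low = high := by omega
      rw [← hle, PySem.List.pyRange_one_eq_nil (by omega)]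
      simp only [List.foldl_nil]
      by_cases hmt : low = max_top
      · rw [if_pos hmt]
        unfold planStep
        rw [msc_eq low max_top hm, if_pos ⟨h0, by omega, Or.inr hmt⟩]
      · rw [if_neg hmt]
        unfold planStep
        rw [msc_eq low max_top hm, if_neg (by omega)]

theorem floordiv_two (a : Int) : PySem.Int.floordiv a 2 = a / 2 :=
  PySem.Int.floordiv_eq_ediv_of_pos (by omega)

theorem mod_two (a : Int) : PySem.Int.mod a 2 = a % 2 :=
  PySem.Int.mod_eq_emod_of_pos (by omega)

-- ===== VERDICT (by name: the statement is the Claim_ definition above) =====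
theorem plan_potion_list_scroll_spec : Claim_equal_plan_potion_list_scroll := by
  intro target_index num_potions _
  unfold Spec_plan_potion_list_scroll plan_potion_list_scroll plan_potion_list_scroll_alt
    VISIBLE_LIST_ROWS
  by_cases hn : num_potions ≤ 0
  · rw [if_pos hn, if_pos hn]
  · rw [if_neg hn, if_neg hn]
    simp only [show (23 : Int) - 1 = 22 from by norm_num]
    set ti := max 0 (min target_index (num_potions - 1)) with hti
    set mt := max 0 (num_potions - 23) with hmt
    set low := max 0 (ti - 22) with hlow
    set high := min ti mt with hhigh
    clear_value ti mt low high
    have h0m : 0 ≤ mt := by omega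
    have h0l : 0 ≤ low := by omega
    have hhm : high ≤ mt := by omega
    by_cases hlh : low ≤ high
    · rw [planFold_eq low high mt h0l hlh hhm]
      have hng : ¬ low > high := by omega
      by_cases he : low % 2 = 0
      · rw [if_pos he]
        simp only [Option.getD_some]
        rw [if_neg hng, if_pos (Or.inl (show PySem.Int.mod low 2 = 0 by rw [mod_two]; exact he))]
        rw [floordiv_two]
      · rw [if_neg he]
        by_cases hl2 : low < high
        · rw [if_pos hl2]
          simp only [Option.getD_some]
          rw [if_neg hng, if_neg (show ¬ (PySem.Int.mod low 2 = 0 ∨ low = high) by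
            rw [mod_two]; omega)]
          rw [floordiv_two]
        · -- low = high, low odd ⟹ low = mt (else low = ti would force ti = 0, even)
          have hle : low = high := by omega
          have hlm : low = mt := by omega
          rw [if_neg hl2, if_pos hlm]
          simp only [Option.getD_some]
          rw [if_neg hng, if_pos (Or.inr hle)]
          rw [floordiv_two]
    · -- low > high: empty candidate range, fallback top = mt (here mt < ti)
      rw [PySem.List.pyRange_one_eq_nil (by omega)]
      simp only [List.foldl_nil, Option.getD_none]
      have hT : min (max ti 0) mt = mt := by omega
      rw [hT]
      rw [msc_eq mt mt h0m, if_pos ⟨h0m, le_rfl, Or.inr rfl⟩]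
      simp only [Option.getD_some]
      rw [if_pos (by omega : low > high)]
      rw [floordiv_two]
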